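-- pv_equiv track=rewrite | github.com/puppetdevz/open-webui-cost-tracker | cost_tracker_function.py | _remove_roles
-- ===== SOURCE A (Python) =====
-- def _remove_roles(content):
--     # Define the roles to be removed
--     roles = ["SYSTEM:", "USER:", "ASSISTANT:", "PROMPT:"]
--
--     # Process each line
--     def process_line(line):
--         for role in roles:
--             if line.startswith(role):
--                 return line.split(":", 1)[1].strip()
--         return line  # Return the line unchanged if no role matches
--
--     return "\n".join([process_line(line) for line in content.split("\n")])
-- ===== SOURCE B (Python) =====
-- _ROLE_KEYS = frozenset({"SYSTEM", "USER", "ASSISTANT", "PROMPT"})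
--
--
-- def _fix(line):
--     parts = line.split(":", 1)
--     if len(parts) == 2 and parts[0] in _ROLE_KEYS:
--         return parts[1].strip()
--     return line
--
--
-- def _remove_roles(content):
--     # one streaming pass: build each line in cur, flush it (fixed) at every
--     # newline and at the end; no split/map/join staging over the whole text
--     out = []
--     cur = []
--     for ch in content:
--         if ch == "\n":
--             out.append(_fix("".join(cur)))
--             out.append("\n")
--             cur = []
--         else:
--             cur.append(ch)
--     out.append(_fix("".join(cur)))
--     return "".join(out)
-- ===== Notes on version B (the rewrite author's own statement) =====
-- stated objective: alternative
-- what changed: A stages the work as split-into-lines, map a per-line role scan over four startswith prefixes, then join; B makes one streaming pass over the characters with an output accumulator, flushing each accumulated line at every newline, and fixes a flushed line by one split at the first colon plus a single set-membership lookup instead of the prefix scan.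
import Mathlib
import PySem

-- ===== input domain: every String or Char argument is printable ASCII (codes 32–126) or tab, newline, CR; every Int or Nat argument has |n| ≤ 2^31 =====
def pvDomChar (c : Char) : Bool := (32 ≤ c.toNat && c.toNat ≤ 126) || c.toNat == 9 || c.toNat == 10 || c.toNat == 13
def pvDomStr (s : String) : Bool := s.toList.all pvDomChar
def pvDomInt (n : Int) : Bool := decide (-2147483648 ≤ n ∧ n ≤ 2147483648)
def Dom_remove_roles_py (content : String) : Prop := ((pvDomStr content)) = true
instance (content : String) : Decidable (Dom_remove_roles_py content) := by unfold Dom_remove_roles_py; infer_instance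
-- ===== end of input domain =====

-- B replaces A's staged split/map/join with one streaming pass over the characters
-- (flushing each line at every newline) and fixes a flushed line by one split at the
-- first colon plus a single set lookup instead of A's scan over four startswith
-- prefixes (objective: alternative).

-- ===== PORT A =====
def pvRolesA : List String := ["SYSTEM:", "USER:", "ASSISTANT:", "PROMPT:"]

-- A's per-line loop over the roles.  line.split(":", 1) always returns (sep ≠ ""), so
-- `.getD []` is never used; [1] is ported with pyGetD "" — in the branch where it is
-- evaluated the matched role guarantees a colon, so index 1 is always in range.
def pvProcessLineA (line : String) : List String → String
  | [] => line
  | role :: rest =>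
    if PySem.Str.startswith line role then
      PySem.Str.strip (PySem.List.pyGetD ((PySem.Str.splitMax? line ":" 1).getD []) 1 "")
    else pvProcessLineA line rest

def remove_roles_py (content : String) : String :=
  PySem.Str.join "\n"
    (((PySem.Str.split? content "\n").getD []).map (fun line => pvProcessLineA line pvRolesA))

-- ===== PORT B =====
def pvRoleKeys : PySem.Set String := PySem.Set.ofList ["SYSTEM", "USER", "ASSISTANT", "PROMPT"]

-- Source B's _fix: parts has length 1 or 2; pyGetD with default "" is only evaluated at
-- in-range indices (the branch guard checks parts.length == 2).
def pvFixB (line : String) : String :=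
  let parts := (PySem.Str.splitMax? line ":" 1).getD []
  if parts.length == 2 && PySem.Set.contains pvRoleKeys (PySem.List.pyGetD parts 0 "") then
    PySem.Str.strip (PySem.List.pyGetD parts 1 "")
  else line

-- one iteration of Source B's for-loop: state = (out, cur)
def pvStepB (st : List String × List Char) (ch : Char) : List String × List Char :=
  if ch = '\n' then (st.1 ++ [pvFixB (String.ofList st.2), "\n"], [])
  else (st.1, st.2 ++ [ch])

def remove_roles_py_alt (content : String) : String :=
  let st := content.toList.foldl pvStepB ([], [])
  PySem.Str.join "" (st.1 ++ [pvFixB (String.ofList st.2)])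

-- ===== PRECONDITION & SPEC =====
def Spec_remove_roles_py (content : String) (out : String) : Prop := out = remove_roles_py_alt content
instance (content : String) (out : String) : Decidable (Spec_remove_roles_py content out) := by unfold Spec_remove_roles_py; infer_instance

-- ===== CLAIM (what is proved, stated in full; the proofs are below) =====
def Claim_equal_remove_roles_py : Prop := ∀ (content : String), Dom_remove_roles_py content → Spec_remove_roles_py content (remove_roles_py content)

-- ===== LEMMAS AND PROOFS =====

-- ---- per-line equivalence: A's prefix scan = B's _fix --------------------------------

-- splitOnMax.go with maxsplit exhausted returns the rest as one last piece.
lemma pv_go_zero (sep : List Char) (fuel : Nat) (l cur : List Char) (acc : List (List Char)) :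
    PySem.Chars.splitOnMax.go sep fuel 0 l cur acc = ((cur.reverse ++ l) :: acc).reverse := by
  cases fuel <;> cases l <;> simp [PySem.Chars.splitOnMax.go]

-- splitOnMax.go on a colon-free remainder.
lemma pv_go_no (l : List Char) (h : ':' ∉ l) (fuel : Nat) (hf : l.length < fuel)
    (cur : List Char) (acc : List (List Char)) :
    PySem.Chars.splitOnMax.go [':'] fuel 1 l cur acc = ((cur.reverse ++ l) :: acc).reverse := by
  induction fuel generalizing l cur with
  | zero => omega
  | succ n ih =>
    cases l with
    | nil => simp [PySem.Chars.splitOnMax.go]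
    | cons c rest =>
      have hc : c ≠ ':' := fun hcc => h (hcc ▸ List.mem_cons_self)
      have hrest : ':' ∉ rest := fun hm => h (List.mem_cons_of_mem _ hm)
      simp only [PySem.Chars.splitOnMax.go]
      rw [if_neg (by omega : ¬ (1 : Nat) = 0)]
      rw [if_neg (by simp [List.isPrefixOf, hc.symm] : ¬ [':'].isPrefixOf (c :: rest) = true)]
      rw [ih rest hrest (by simpa using Nat.lt_of_succ_lt_succ hf) (c :: cur)]
      simp

-- splitOnMax.go splits at the first colon and keeps the rest whole (maxsplit = 1).
lemma pv_go_yes (pre suf : List Char) (hp : ':' ∉ pre) (fuel : Nat)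
    (hf : (pre ++ ':' :: suf).length < fuel) (cur : List Char) (acc : List (List Char)) :
    PySem.Chars.splitOnMax.go [':'] fuel 1 (pre ++ ':' :: suf) cur acc
      = (suf :: (cur.reverse ++ pre) :: acc).reverse := by
  induction fuel generalizing pre cur with
  | zero => omega
  | succ n ih =>
    cases pre with
    | nil =>
      simp only [List.nil_append, PySem.Chars.splitOnMax.go]
      rw [if_neg (by omega : ¬ (1 : Nat) = 0)]
      rw [if_pos (by simp [List.isPrefixOf] : [':'].isPrefixOf (':' :: suf) = true)]
      simp only [List.length_singleton, List.drop_succ_cons, List.drop_zero]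
      rw [pv_go_zero]
      simp
    | cons c pre' =>
      have hc : c ≠ ':' := fun hcc => hp (hcc ▸ List.mem_cons_self)
      have hp' : ':' ∉ pre' := fun hm => hp (List.mem_cons_of_mem _ hm)
      simp only [List.cons_append, PySem.Chars.splitOnMax.go]
      rw [if_neg (by omega : ¬ (1 : Nat) = 0)]
      rw [if_neg (by simp [List.isPrefixOf, hc.symm] :
        ¬ [':'].isPrefixOf (c :: (pre' ++ ':' :: suf)) = true)]
      rw [ih pre' hp' (by simp at hf ⊢; omega) (c :: cur)]
      simp

lemma pv_split_no (cs : List Char) (h : ':' ∉ cs) :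
    PySem.Chars.splitOnMax cs [':'] 1 = [cs] := by
  rw [PySem.Chars.splitOnMax, if_neg (by omega : ¬ (1 : Int) < 0), Int.toNat_one]
  rw [pv_go_no cs h _ (by omega)]
  simp

lemma pv_split_yes (pre suf : List Char) (hp : ':' ∉ pre) :
    PySem.Chars.splitOnMax (pre ++ ':' :: suf) [':'] 1 = [pre, suf] := by
  rw [PySem.Chars.splitOnMax, if_neg (by omega : ¬ (1 : Int) < 0), Int.toNat_one]
  rw [pv_go_yes pre suf hp _ (by omega)]
  simp

-- every list of characters is either colon-free or splits at its FIRST colon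
lemma pv_first_colon (cs : List Char) :
    ':' ∉ cs ∨ ∃ pre suf, cs = pre ++ ':' :: suf ∧ ':' ∉ pre := by
  induction cs with
  | nil => exact Or.inl (by simp)
  | cons c rest ih =>
    by_cases hc : c = ':'
    · exact Or.inr ⟨[], rest, by simp [hc], by simp⟩
    · rcases ih with h | ⟨pre, suf, hdec, hp⟩
      · exact Or.inl (by simp [h, Ne.symm hc])
      · exact Or.inr ⟨c :: pre, suf, by simp [hdec], by simp [Ne.symm hc, hp]⟩

-- a prefix ending in ':' forces a colon in the string
lemma pv_pref_mem (r cs : List Char) (h : (r ++ [':']).isPrefixOf cs = true) : ':' ∈ cs :=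
  (List.isPrefixOf_iff_prefix.mp h).subset (by simp)

-- with no colon in r nor in pre, "r:" is a prefix of "pre:suf" exactly when r = pre
lemma pv_pref_iff (r pre suf : List Char) (hr : ':' ∉ r) (hp : ':' ∉ pre) :
    (r ++ [':']).isPrefixOf (pre ++ ':' :: suf) = true ↔ r = pre := by
  induction r generalizing pre with
  | nil =>
    cases pre with
    | nil => simp [List.isPrefixOf]
    | cons c pre' =>
      have hc : c ≠ ':' := fun hcc => hp (hcc ▸ List.mem_cons_self)
      simp [List.isPrefixOf, Ne.symm hc]
  | cons a r' ihr =>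
    have ha : a ≠ ':' := fun hcc => hr (hcc ▸ List.mem_cons_self)
    have hr' : ':' ∉ r' := fun hm => hr (List.mem_cons_of_mem _ hm)
    cases pre with
    | nil => simp [List.isPrefixOf, ha]
    | cons c pre' =>
      have hp' : ':' ∉ pre' := fun hm => hp (List.mem_cons_of_mem _ hm)
      simp only [List.cons_append, List.isPrefixOf, List.cons.injEq]
      rw [Bool.and_eq_true, beq_iff_eq, ihr pre' hr' hp']

lemma pv_ofList_eq (l : List Char) (s : String) : (String.ofList l = s) ↔ l = s.toList := by
  constructor
  · intro h; rw [← h, String.toList_ofList]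
  · intro h; rw [h, String.ofList_toList]

-- the two per-line computations agree on every line
lemma pv_line_eq (line : String) : pvProcessLineA line pvRolesA = pvFixB line := by
  rcases pv_first_colon line.toList with h | ⟨pre, suf, hdec, hp⟩
  · -- no colon: no role matches on the A side, one part on the B side
    have hsw : ∀ r : List Char, (r ++ [':']).isPrefixOf line.toList = false := by
      intro r
      cases hb : (r ++ [':']).isPrefixOf line.toList
      · rfl
      · exact absurd (pv_pref_mem r _ hb) h
    have hsplit : PySem.Str.splitMax? line ":" 1 = some [line] := by
      simp [PySem.Str.splitMax?, PySem.Chars.splitMax?,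
        (by decide : (":" : String).toList = [':']), pv_split_no line.toList h,
        String.ofList_toList]
    simp only [pvProcessLineA, pvRolesA, pvFixB, hsplit, PySem.Str.startswith,
      PySem.Chars.startswith,
      (by decide : ("SYSTEM:" : String).toList = "SYSTEM".toList ++ [':']),
      (by decide : ("USER:" : String).toList = "USER".toList ++ [':']),
      (by decide : ("ASSISTANT:" : String).toList = "ASSISTANT".toList ++ [':']),
      (by decide : ("PROMPT:" : String).toList = "PROMPT".toList ++ [':']), hsw]
    simp
  · -- a first colon: A's role scan matches iff the part before it is one of the keys
    have hsplit : PySem.Str.splitMax? line ":" 1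
        = some [String.ofList pre, String.ofList suf] := by
      simp [PySem.Str.splitMax?, PySem.Chars.splitMax?,
        (by decide : (":" : String).toList = [':']), hdec, pv_split_yes pre suf hp]
    have hsw : ∀ r : List Char, ':' ∉ r →
        ((r ++ [':']).isPrefixOf line.toList = true ↔ r = pre) := by
      intro r hr; rw [hdec]; exact pv_pref_iff r pre suf hr hp
    have hc : ∀ (role key : String), role.toList = key.toList ++ [':'] → ':' ∉ key.toList →
        PySem.Str.startswith line role = decide (pre = key.toList) := by
      intro role key hk hnc
      by_cases hx : pre = key.toList
      · simp only [hx, decide_true, PySem.Str.startswith, PySem.Chars.startswith, hk]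
        exact (hsw _ hnc).mpr hx.symm
      · simp only [hx, decide_false, PySem.Str.startswith, PySem.Chars.startswith, hk]
        rw [Bool.eq_false_iff]
        exact fun hb => hx ((hsw _ hnc).mp hb).symm
    simp only [pvProcessLineA, pvRolesA, pvFixB, hsplit, Option.getD_some,
      hc "SYSTEM:" "SYSTEM" (by decide) (by decide),
      hc "USER:" "USER" (by decide) (by decide),
      hc "ASSISTANT:" "ASSISTANT" (by decide) (by decide),
      hc "PROMPT:" "PROMPT" (by decide) (by decide),
      List.length_cons, List.length_nil]
    rw [(by decide : pvRoleKeys = ["SYSTEM", "USER", "ASSISTANT", "PROMPT"])]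
    by_cases h1 : pre = ['S', 'Y', 'S', 'T', 'E', 'M']
    · simp [h1]
    · by_cases h2 : pre = ['U', 'S', 'E', 'R']
      · simp [h2]
      · by_cases h3 : pre = ['A', 'S', 'S', 'I', 'S', 'T', 'A', 'N', 'T']
        · simp [h3]
        · by_cases h4 : pre = ['P', 'R', 'O', 'M', 'P', 'T']
          · simp [h4]
          · simp [pv_ofList_eq, h1, h2, h3, h4]

-- ---- streaming pass = split / map / join ---------------------------------------------

-- the lines of cs (split on '\n'), with pvConsHead prepending chars to the first line
def pvConsHead (x : List Char) : List (List Char) → List (List Char)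
  | [] => [x]
  | y :: ys => (x ++ y) :: ys

def pvLines : List Char → List (List Char)
  | [] => [[]]
  | c :: rest => if c = '\n' then [] :: pvLines rest else pvConsHead [c] (pvLines rest)

lemma pvLines_ne_nil (cs : List Char) : pvLines cs ≠ [] := by
  cases cs with
  | nil => simp [pvLines]
  | cons c rest =>
    simp only [pvLines]
    split_ifs
    · simp
    · cases h : pvLines rest <;> simp [pvConsHead]

lemma pvConsHead_nil (ls : List (List Char)) (h : ls ≠ []) : pvConsHead [] ls = ls := by
  cases ls with
  | nil => exact absurd rfl h
  | cons y ys => simp [pvConsHead]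

lemma pvConsHead_assoc (a b : List Char) (ls : List (List Char)) :
    pvConsHead a (pvConsHead b ls) = pvConsHead (a ++ b) ls := by
  cases ls <;> simp [pvConsHead, List.append_assoc]

-- splitOn.go with sep = "\n" computes pvLines (relative to cur / acc)
lemma pv_go_lines (cs : List Char) : ∀ (fuel : Nat), cs.length < fuel →
    ∀ (cur : List Char) (acc : List (List Char)),
    PySem.Chars.splitOn.go ['\n'] fuel cs cur acc
      = acc.reverse ++ pvConsHead cur.reverse (pvLines cs) := by
  induction cs with
  | nil =>
    intro fuel _ cur acc
    cases fuel <;> simp [PySem.Chars.splitOn.go, pvLines, pvConsHead]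
  | cons c rest ih =>
    intro fuel hf cur acc
    cases fuel with
    | zero => omega
    | succ n =>
      by_cases hc : c = '\n'
      · simp only [PySem.Chars.splitOn.go, hc,
          (by simp [List.isPrefixOf] : ['\n'].isPrefixOf ('\n' :: rest) = true), if_true]
        simp only [List.length_singleton, List.drop_succ_cons, List.drop_zero]
        rw [ih n (by simpa using Nat.lt_of_succ_lt_succ hf) [] (cur.reverse :: acc)]
        simp only [List.reverse_nil]
        rw [pvConsHead_nil _ (pvLines_ne_nil rest)]
        simp [pvLines, pvConsHead]
      · simp only [PySem.Chars.splitOn.go,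
          (by simp [List.isPrefixOf, Ne.symm hc] : ['\n'].isPrefixOf (c :: rest) = false),
          Bool.false_eq_true, if_false]
        rw [ih n (by simpa using Nat.lt_of_succ_lt_succ hf) (c :: cur) acc]
        simp only [pvLines, hc, if_false, List.reverse_cons]
        rw [← pvConsHead_assoc]

lemma pv_splitOn_lines (cs : List Char) :
    PySem.Chars.splitOn cs ['\n'] = pvLines cs := by
  rw [PySem.Chars.splitOn, pv_go_lines cs (cs.length + 1) (by omega) [] []]
  simp [pvConsHead_nil _ (pvLines_ne_nil cs)]

-- "".join is concatenation
lemma pv_join_nil (ls : List (List Char)) : PySem.Chars.join [] ls = ls.flatten := by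
  induction ls with
  | nil => simp [PySem.Chars.join, List.intercalate]
  | cons x ys ih =>
    cases ys with
    | nil => simp [PySem.Chars.join_singleton]
    | cons y ys' =>
      rw [PySem.Chars.join_cons_cons]
      simp only [List.flatten_cons]
      rw [← List.flatten_cons]
      rw [ih]
      simp

-- "\n".join over the fixed lines, on char lists
def pvJoinFix (ls : List (List Char)) : List Char :=
  PySem.Chars.join ['\n'] (ls.map (fun l => (pvFixB (String.ofList l)).toList))

lemma pvJoinFix_cons (l : List Char) (ls : List (List Char)) (h : ls ≠ []) :
    pvJoinFix (l :: ls) = (pvFixB (String.ofList l)).toList ++ '\n' :: pvJoinFix ls := by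
  cases ls with
  | nil => exact absurd rfl h
  | cons y ys =>
    simp only [pvJoinFix, List.map_cons]
    rw [PySem.Chars.join_cons_cons]
    simp

-- the streaming fold, started from (out, cur), computes "".join(out) followed by the
-- joined fixed lines of cur ++ cs (cur prepended to the first line)
lemma pv_stream (cs : List Char) : ∀ (out : List String) (cur : List Char),
    PySem.Chars.join []
        (((cs.foldl pvStepB (out, cur)).1
            ++ [pvFixB (String.ofList (cs.foldl pvStepB (out, cur)).2)]).map String.toList)
      = PySem.Chars.join [] (out.map String.toList) ++ pvJoinFix (pvConsHead cur (pvLines cs)) := by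
  induction cs with
  | nil =>
    intro out cur
    simp only [List.foldl_nil, pvLines, pvConsHead, pvJoinFix, List.map_singleton]
    rw [PySem.Chars.join_singleton]
    simp only [List.map_append, List.map_singleton]
    rw [pv_join_nil, pv_join_nil, List.flatten_append]
    simp
  | cons c rest ih =>
    intro out cur
    by_cases hc : c = '\n'
    · simp only [List.foldl_cons, pvStepB, hc, if_true]
      rw [ih (out ++ [pvFixB (String.ofList cur), "\n"]) []]
      rw [pvConsHead_nil _ (pvLines_ne_nil rest)]
      rw [show pvLines ('\n' :: rest) = [] :: pvLines rest by simp [pvLines]]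
      rw [show pvConsHead cur ([] :: pvLines rest) = cur :: pvLines rest by simp [pvConsHead]]
      rw [pvJoinFix_cons cur (pvLines rest) (pvLines_ne_nil rest)]
      rw [pv_join_nil, pv_join_nil]
      simp [List.append_assoc,
        (by decide : ("\n" : String).toList = ['\n'])]
    · simp only [List.foldl_cons, pvStepB, hc, if_false]
      rw [ih out (cur ++ [c])]
      simp only [pvLines, hc, if_false]
      rw [pvConsHead_assoc]

-- ===== VERDICT (by name: the statement is the Claim_ definition above) =====
theorem remove_roles_py_spec : Claim_equal_remove_roles_py := by
  intro content _
  unfold Spec_remove_roles_py remove_roles_py remove_roles_py_alt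
  have hsplit : PySem.Str.split? content "\n"
      = some ((pvLines content.toList).map String.ofList) := by
    simp [PySem.Str.split?, PySem.Chars.split?,
      (by decide : ("\n" : String).toList = ['\n']), pv_splitOn_lines]
  rw [hsplit]
  simp only [Option.getD_some, List.map_map]
  rw [PySem.Str.join, PySem.Str.join]
  congr 1
  rw [(by decide : ("" : String).toList = ([] : List Char))]
  rw [pv_stream content.toList [] []]
  rw [pvConsHead_nil _ (pvLines_ne_nil content.toList)]
  simp only [List.map_nil]
  rw [pv_join_nil, List.flatten_nil, List.nil_append]
  unfold pvJoinFix
  rw [(by decide : ("\n" : String).toList = ['\n'])]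
  congr 1
  rw [List.map_map]
  apply List.map_congr_left
  intro l _
  simp [Function.comp, pv_line_eq (String.ofList l)]
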